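-- pv_equiv track=rewrite | github.com/chris-day/owl2vault | owl2vault/obsidian_writer.py | _iri_to_curie
-- ===== SOURCE A (Python) =====
-- from typing import Dict, Optional
--
-- def _iri_to_curie(iri: str, prefixes: Dict[str, str]) -> Optional[str]:
--     best_prefix = None
--     best_base = ""
--     for prefix, base in prefixes.items():
--         if iri.startswith(base) and len(base) > len(best_base):
--             best_prefix = prefix
--             best_base = base
--     if best_prefix is None:
--         return None
--     suffix = iri[len(best_base) :]
--     return f"{best_prefix}:{suffix}"
-- ===== SOURCE B (Python) =====
-- def _iri_to_curie(iri, prefixes):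
--     for prefix, base in sorted(prefixes.items(), key=lambda kv: -len(kv[1])):
--         if base and iri.startswith(base):
--             return f"{prefix}:{iri[len(base):]}"
--     return None
-- ===== Notes on version B (the rewrite author's own statement) =====
-- stated objective: simpler
-- what changed: Replaced the scan that tracks the longest matching base with a stable sort of the prefix items by descending base length followed by a single first-match loop that returns immediately.
import Mathlib
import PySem

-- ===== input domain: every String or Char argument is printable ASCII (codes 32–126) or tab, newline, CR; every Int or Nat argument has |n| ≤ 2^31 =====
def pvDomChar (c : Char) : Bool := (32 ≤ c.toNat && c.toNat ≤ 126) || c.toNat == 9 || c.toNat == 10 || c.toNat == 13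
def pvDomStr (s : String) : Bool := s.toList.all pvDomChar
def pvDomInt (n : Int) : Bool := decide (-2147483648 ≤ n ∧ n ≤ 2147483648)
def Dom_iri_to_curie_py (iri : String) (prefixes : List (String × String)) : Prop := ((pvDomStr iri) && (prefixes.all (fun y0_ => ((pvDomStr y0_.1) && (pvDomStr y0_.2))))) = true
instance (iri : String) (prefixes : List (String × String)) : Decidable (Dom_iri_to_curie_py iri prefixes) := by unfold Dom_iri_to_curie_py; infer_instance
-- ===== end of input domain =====

-- B replaces A's scan-and-track-maximum with a stable sort by descending base
-- length followed by a first-match scan (objective: simpler first-match loop).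

-- ===== PORT A =====
-- literal port of A: one pass tracking (best_prefix, best_base), then build the CURIE
def iri_to_curie_py (iri : String) (prefixes : List (String × String)) : Option String :=
  let st := prefixes.foldl
    (fun st pb =>
      if PySem.Str.startswith iri pb.2 && decide (PySem.Str.len st.2 < PySem.Str.len pb.2)
      then (some pb.1, pb.2) else st)
    ((none : Option String), "")
  match st.1 with
  | none => none
  | some p => some (p ++ ":" ++ PySem.Str.slice iri (some (PySem.Str.len st.2)) none)

-- ===== PORT B =====
-- sort key: kv -> -len(kv[1])
def pvAltKey (kv : String × String) : Int := -(PySem.Str.len kv.2)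

-- the 'for … return …' loop of B
def pvAltScan (iri : String) : List (String × String) → Option String
  | [] => none
  | (p, b) :: rest =>
      if decide (b ≠ "") && PySem.Str.startswith iri b
      then some (p ++ ":" ++ PySem.Str.slice iri (some (PySem.Str.len b)) none)
      else pvAltScan iri rest

def iri_to_curie_py_alt (iri : String) (prefixes : List (String × String)) : Option String :=
  pvAltScan iri (PySem.List.sorted prefixes pvAltKey)

-- ===== PRECONDITION & SPEC =====
def Spec_iri_to_curie_py (iri : String) (prefixes : List (String × String)) (out : Option String) : Prop := out = iri_to_curie_py_alt iri prefixes
instance (iri : String) (prefixes : List (String × String)) (out : Option String) : Decidable (Spec_iri_to_curie_py iri prefixes out) := by unfold Spec_iri_to_curie_py; infer_instance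

-- ===== CLAIM (what is proved, stated in full; the proofs are below) =====
def Claim_equal_iri_to_curie_py : Prop := ∀ (iri : String) (prefixes : List (String × String)), Dom_iri_to_curie_py iri prefixes → Spec_iri_to_curie_py iri prefixes (iri_to_curie_py iri prefixes)

-- ===== LEMMAS AND PROOFS =====

-- the predicate B tests inside the loop ('base and iri.startswith(base)')
def pvQ (iri : String) (pb : String × String) : Bool :=
  decide (pb.2 ≠ "") && PySem.Str.startswith iri pb.2

-- A's loop body, named
def pvStep (iri : String) (st : Option String × String) (pb : String × String) :
    Option String × String :=
  if PySem.Str.startswith iri pb.2 && decide (PySem.Str.len st.2 < PySem.Str.len pb.2)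
  then (some pb.1, pb.2) else st

-- the comparator PySem.List.sorted uses for key pvAltKey
def pvCmp (a b : String × String) : Bool := decide (pvAltKey a < pvAltKey b)

lemma pvLen_nonneg (s : String) : 0 ≤ PySem.Str.len s := by
  rw [PySem.Str.len_eq]; exact Int.natCast_nonneg _

lemma pvLen_pos_of_ne (s : String) (h : s ≠ "") : 0 < PySem.Str.len s := by
  rw [PySem.Str.len_eq]
  have h1 : s.toList ≠ [] := fun hnil => h (String.toList_eq_nil_iff.mp hnil)
  have : 0 < s.toList.length := List.length_pos_iff.mpr h1
  exact_mod_cast this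

-- B's loop is find? followed by building the CURIE
lemma pvAltScan_eq_find (iri : String) (s : List (String × String)) :
    pvAltScan iri s =
      (s.find? (pvQ iri)).map
        (fun pb => pb.1 ++ ":" ++ PySem.Str.slice iri (some (PySem.Str.len pb.2)) none) := by
  induction s with
  | nil => rfl
  | cons hd tl ih =>
      obtain ⟨p, b⟩ := hd
      simp only [pvAltScan, List.find?]
      have hq : pvQ iri (p, b) = (decide (b ≠ "") && PySem.Str.startswith iri b) := rfl
      rw [hq]
      cases h : (decide (b ≠ "") && PySem.Str.startswith iri b)
      · simpa using ih
      · simp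

-- inserting an element that fails the test does not change find?
lemma pvFind_insertBy_of_not (iri : String) (x : String × String)
    (s : List (String × String)) (hx : pvQ iri x = false) :
    (PySem.List.insertBy pvCmp x s).find? (pvQ iri) = s.find? (pvQ iri) := by
  induction s with
  | nil => simp [PySem.List.insertBy, hx]
  | cons y ys ih =>
      by_cases hc : pvCmp x y = true
      · simp [PySem.List.insertBy, hc, hx]
      · simp only [Bool.not_eq_true] at hc
        by_cases hy : pvQ iri y = true
        · simp [PySem.List.insertBy, hc, List.find?, hy]
        · simp only [Bool.not_eq_true] at hy
          simp [PySem.List.insertBy, hc, List.find?, hy, ih]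

-- inserting a passing element strictly smaller (in key) than every passing element wins
lemma pvFind_insertBy_lt (iri : String) (x : String × String)
    (s : List (String × String)) (hx : pvQ iri x = true)
    (hall : ∀ y ∈ s, pvQ iri y = true → pvAltKey x < pvAltKey y) :
    (PySem.List.insertBy pvCmp x s).find? (pvQ iri) = some x := by
  induction s with
  | nil => simp [PySem.List.insertBy, hx]
  | cons y ys ih =>
      by_cases hc : pvCmp x y = true
      · simp [PySem.List.insertBy, hc, hx]
      · simp only [Bool.not_eq_true] at hc
        have hy : pvQ iri y = false := by
          by_contra hy'
          simp only [Bool.not_eq_false] at hy'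
          have hlt := hall y (List.mem_cons_self) hy'
          have hcl : decide (pvAltKey x < pvAltKey y) = false := hc
          exact absurd hlt (of_decide_eq_false hcl)
        simp only [PySem.List.insertBy, hc, Bool.false_eq_true, if_false]
        rw [List.find?_cons_of_neg (by simp [hy])]
        exact ih (fun z hz hq => hall z (List.mem_cons_of_mem _ hz) hq)

-- inserting an element whose key is ≥ the found one keeps the found one (stability + order)
lemma pvFind_insertBy_ge (iri : String) (x b : String × String)
    (s : List (String × String))
    (hs : s.Pairwise (fun a c => pvAltKey a ≤ pvAltKey c))
    (hb : s.find? (pvQ iri) = some b) (hK : pvAltKey b ≤ pvAltKey x) :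
    (PySem.List.insertBy pvCmp x s).find? (pvQ iri) = some b := by
  induction s with
  | nil => simp [List.find?] at hb
  | cons y ys ih =>
      have hmem : b ∈ y :: ys := List.mem_of_find?_eq_some hb
      have hyb : pvAltKey y ≤ pvAltKey b := by
        rcases List.mem_cons.mp hmem with h | h
        · simp [h]
        · exact (List.pairwise_cons.mp hs).1 b h
      have hc : pvCmp x y = false := by
        have : ¬ pvAltKey x < pvAltKey y := not_lt.mpr (le_trans hyb hK)
        simp [pvCmp, this]
      simp only [PySem.List.insertBy, hc, Bool.false_eq_true, if_false]
      by_cases hy : pvQ iri y = true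
      · have hyb' : y = b := by
          simp only [List.find?, hy] at hb
          exact Option.some.inj hb
        subst hyb'
        rw [List.find?_cons_of_pos hy]
      · simp only [Bool.not_eq_true] at hy
        rw [List.find?_cons_of_neg (by simp [hy])] at hb ⊢
        exact ih (List.pairwise_cons.mp hs).2 hb

-- the invariant tying A's running state to find? on the sorted prefix
def pvInv (iri : String) (s : List (String × String)) (st : Option String × String) : Prop :=
  (st.1 = none → st.2 = "" ∧ s.find? (pvQ iri) = none) ∧
  (∀ p, st.1 = some p →
    s.find? (pvQ iri) = some (p, st.2) ∧
    ∀ y ∈ s, pvQ iri y = true → pvAltKey (p, st.2) ≤ pvAltKey y)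

lemma pvQ_of_cond (iri : String) (st : Option String × String) (pb : String × String)
    (h : (PySem.Str.startswith iri pb.2 && decide (PySem.Str.len st.2 < PySem.Str.len pb.2)) = true) :
    pvQ iri pb = true := by
  simp only [Bool.and_eq_true, decide_eq_true_eq] at h
  have hne : pb.2 ≠ "" := by
    intro hnil
    have h0 : PySem.Str.len pb.2 = 0 := by rw [hnil]; rfl
    have := pvLen_nonneg st.2
    omega
  simp only [pvQ, Bool.and_eq_true, decide_eq_true_eq]
  exact ⟨hne, h.1⟩

lemma pvStep_preserves (iri : String) (x : String × String)
    (s : List (String × String)) (st : Option String × String)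
    (hs : s.Pairwise (fun a c => pvAltKey a ≤ pvAltKey c))
    (hinv : pvInv iri s st) :
    pvInv iri (PySem.List.insertBy pvCmp x s) (pvStep iri st x) := by
  obtain ⟨hnone, hsome⟩ := hinv
  by_cases hcondB : (PySem.Str.startswith iri x.2 && decide (PySem.Str.len st.2 < PySem.Str.len x.2)) = true
  · -- A updates its best to x
    have hqx : pvQ iri x = true := pvQ_of_cond iri st x hcondB
    have hstep : pvStep iri st x = (some x.1, x.2) := by
      unfold pvStep; rw [if_pos hcondB]
    have hcond := hcondB
    simp only [Bool.and_eq_true, decide_eq_true_eq] at hcond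
    have hfind : (PySem.List.insertBy pvCmp x s).find? (pvQ iri) = some x := by
      cases hst : st.1 with
      | none =>
          obtain ⟨-, hfn⟩ := hnone hst
          refine pvFind_insertBy_lt iri x s hqx (fun y hy hqy => ?_)
          exact absurd hqy (List.find?_eq_none.mp hfn y hy)
      | some p =>
          obtain ⟨hf, hmax⟩ := hsome p hst
          refine pvFind_insertBy_lt iri x s hqx (fun y hy hqy => ?_)
          have h1 : pvAltKey (p, st.2) ≤ pvAltKey y := hmax y hy hqy
          have h2 : pvAltKey x < pvAltKey (p, st.2) := by
            simp only [pvAltKey]; omega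
          omega
    have hk_le : ∀ y ∈ s, pvQ iri y = true → pvAltKey x ≤ pvAltKey y := by
      intro y hy hqy
      cases hst : st.1 with
      | none =>
          obtain ⟨-, hfn⟩ := hnone hst
          exact absurd hqy (List.find?_eq_none.mp hfn y hy)
      | some p' =>
          obtain ⟨-, hmax⟩ := hsome p' hst
          have h1 := hmax y hy hqy
          have h2 : pvAltKey x < pvAltKey (p', st.2) := by
            simp only [pvAltKey]; omega
          omega
    rw [hstep]
    constructor
    · intro h; exact absurd h (by simp)
    · intro p hp
      have hp' : p = x.1 := by simpa using hp.symm
      subst hp'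
      refine ⟨hfind, ?_⟩
      intro y hy hqy
      rcases (PySem.List.mem_insertBy pvCmp x y s).mp hy with rfl | hy'
      · exact le_refl _
      · exact hk_le y hy' hqy
  · -- A keeps its state
    have hstep : pvStep iri st x = st := by
      unfold pvStep; rw [if_neg hcondB]
    rw [hstep]
    constructor
    · intro hst
      obtain ⟨hb, hfn⟩ := hnone hst
      refine ⟨hb, ?_⟩
      have hqx : pvQ iri x = false := by
        by_cases hsw : PySem.Str.startswith iri x.2 = true
        · have hlen : ¬ PySem.Str.len st.2 < PySem.Str.len x.2 := by
            intro hl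
            exact hcondB (by rw [hsw, decide_eq_true hl]; rfl)
          have hb0 : PySem.Str.len st.2 = 0 := by rw [hb]; rfl
          have hx2 : x.2 = "" := by
            by_contra hne
            have := pvLen_pos_of_ne x.2 hne
            omega
          show (decide (x.2 ≠ "") && PySem.Str.startswith iri x.2) = false
          rw [hx2, show decide (("" : String) ≠ "") = false from rfl, Bool.false_and]
        · simp only [Bool.not_eq_true] at hsw
          show (decide (x.2 ≠ "") && PySem.Str.startswith iri x.2) = false
          rw [hsw, Bool.and_false]
      rw [pvFind_insertBy_of_not iri x s hqx]; exact hfn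
    · intro p hst
      obtain ⟨hf, hmax⟩ := hsome p hst
      by_cases hqx : pvQ iri x = true
      · have hsw : PySem.Str.startswith iri x.2 = true := by
          simp only [pvQ, Bool.and_eq_true] at hqx; exact hqx.2
        have hlen : ¬ PySem.Str.len st.2 < PySem.Str.len x.2 := by
          intro hl
          exact hcondB (by rw [hsw, decide_eq_true hl]; rfl)
        have hK : pvAltKey (p, st.2) ≤ pvAltKey x := by simp only [pvAltKey]; omega
        refine ⟨pvFind_insertBy_ge iri x (p, st.2) s hs hf hK, ?_⟩
        intro y hy hqy
        rcases (PySem.List.mem_insertBy pvCmp x y s).mp hy with rfl | hy'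
        · exact hK
        · exact hmax y hy' hqy
      · simp only [Bool.not_eq_true] at hqx
        refine ⟨by rw [pvFind_insertBy_of_not iri x s hqx]; exact hf, ?_⟩
        intro y hy hqy
        rcases (PySem.List.mem_insertBy pvCmp x y s).mp hy with rfl | hy'
        · rw [hqx] at hqy; exact absurd hqy (by simp)
        · exact hmax y hy' hqy

lemma pvSorted_snoc (l : List (String × String)) (x : String × String) :
    PySem.List.sorted (l ++ [x]) pvAltKey =
      PySem.List.insertBy pvCmp x (PySem.List.sorted l pvAltKey) := by
  rw [PySem.List.sorted_eq_foldl_insertBy, PySem.List.sorted_eq_foldl_insertBy,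
    List.foldl_append]
  rfl

lemma pvInv_main (iri : String) (l : List (String × String)) :
    pvInv iri (PySem.List.sorted l pvAltKey) (l.foldl (pvStep iri) (none, "")) := by
  induction l using List.reverseRecOn with
  | nil =>
      constructor
      · intro _; exact ⟨rfl, rfl⟩
      · intro p hp; simp at hp
  | append_singleton l' x ih =>
      rw [pvSorted_snoc, List.foldl_append, List.foldl_cons, List.foldl_nil]
      exact pvStep_preserves iri x _ _ (PySem.List.sorted_pairwise l' pvAltKey) ih

-- ===== VERDICT (by name: the statement is the Claim_ definition above) =====
theorem iri_to_curie_py_spec : Claim_equal_iri_to_curie_py := by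
  intro iri prefixes _
  unfold Spec_iri_to_curie_py iri_to_curie_py iri_to_curie_py_alt
  rw [pvAltScan_eq_find]
  have hinv := pvInv_main iri prefixes
  have hfold : prefixes.foldl
      (fun st pb =>
        if PySem.Str.startswith iri pb.2 && decide (PySem.Str.len st.2 < PySem.Str.len pb.2)
        then (some pb.1, pb.2) else st)
      ((none : Option String), "") = prefixes.foldl (pvStep iri) (none, "") := rfl
  simp only [hfold]
  obtain ⟨hnone, hsome⟩ := hinv
  cases hst : (prefixes.foldl (pvStep iri) (none, "")).1 with
  | none =>
      obtain ⟨-, hfn⟩ := hnone hst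
      simp [hfn]
  | some p =>
      obtain ⟨hf, -⟩ := hsome p hst
      simp [hf]
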